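-- pv_equiv track=rewrite | github.com/aleena2121/LeetCode | 2149-remove-colored-pieces-if-both-neighbors-are-the-same-color/2149-remove-colored-pieces-if-both-neighbors-are-the-same-color.py | winnerOfGame
-- ===== SOURCE A (Python) =====
-- def winnerOfGame(colors):
--     """
--     :type colors: str
--     :rtype: bool
--     """
--     c = list(colors)
--     a = 0
--     b = 0
--     for i in range(1,len(c)-1):
--         if c[i-1] == c[i] == c[i+1] == "A":
--             a +=1
--         if c[i-1] == c[i] ==  c[i+1] == "B":
--             b +=1
--     if a>b:
--         return True
--     else:
--         return False
-- ===== SOURCE B (Python) =====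
-- def winnerOfGame(colors):
--     """
--     :type colors: str
--     :rtype: bool
--     """
--     a = 0
--     b = 0
--     i = 0
--     n = len(colors)
--     while i < n:
--         j = i + 1
--         while j < n and colors[j] == colors[i]:
--             j += 1
--         run = j - i
--         if colors[i] == 'A':
--             a += max(0, run - 2)
--         elif colors[i] == 'B':
--             b += max(0, run - 2)
--         i = j
--     return a > b
-- ===== Notes on version B (the rewrite author's own statement) =====
-- stated objective: alternative
-- what changed: B replaces the per-index triplet-window scan with a run-length pass: it splits the string into maximal runs of equal characters and, per run of length L, credits max(0, L-2) moves to the counter of that run's player.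
import Mathlib
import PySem

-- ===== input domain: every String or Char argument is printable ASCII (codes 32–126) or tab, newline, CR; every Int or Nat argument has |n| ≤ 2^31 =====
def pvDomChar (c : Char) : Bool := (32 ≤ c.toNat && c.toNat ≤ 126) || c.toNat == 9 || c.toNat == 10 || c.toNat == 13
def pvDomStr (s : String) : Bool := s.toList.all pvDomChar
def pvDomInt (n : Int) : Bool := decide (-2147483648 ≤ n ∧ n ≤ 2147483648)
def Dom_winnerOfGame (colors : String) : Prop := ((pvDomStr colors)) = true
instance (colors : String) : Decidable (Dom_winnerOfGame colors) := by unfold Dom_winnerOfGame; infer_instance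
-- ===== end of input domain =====

-- B replaces A's per-index triplet-window scan with a run-length pass over maximal equal-character runs, adding max(0, run-2) per run; alternative decomposition, same O(n) cost.

-- ===== PORT A =====
-- A: c = list(colors); for i in range(1, len(c)-1): two chained-comparison tests on the window (c[i-1], c[i], c[i+1]); return a > b.
def winnerOfGame (colors : String) : Bool :=
  let c := colors.toList
  let p := (PySem.List.pyRange 1 (PySem.List.len c - 1) 1).foldl
    (fun (ab : Int × Int) i =>
      let ab :=
        if PySem.List.pyGetD c (i-1) ' ' = PySem.List.pyGetD c i ' ' ∧
           PySem.List.pyGetD c i ' ' = PySem.List.pyGetD c (i+1) ' ' ∧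
           PySem.List.pyGetD c (i+1) ' ' = 'A'
        then (ab.1 + 1, ab.2) else ab
      if PySem.List.pyGetD c (i-1) ' ' = PySem.List.pyGetD c i ' ' ∧
         PySem.List.pyGetD c i ' ' = PySem.List.pyGetD c (i+1) ' ' ∧
         PySem.List.pyGetD c (i+1) ' ' = 'B'
      then (ab.1, ab.2 + 1) else ab)
    (0, 0)
  decide (p.1 > p.2)

-- ===== PORT B =====
-- Source B's outer while loop over run starts, rendered as recursion on the remaining suffix;
-- the inner while loop that advances j over the current run is the takeWhile/dropWhile split.
def pvRuns : List Char → Int × Int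
  | [] => (0, 0)
  | x :: rest =>
    let run : Int := 1 + (rest.takeWhile (fun y => y == x)).length
    let p := pvRuns (rest.dropWhile (fun y => y == x))
    if x = 'A' then (p.1 + max 0 (run - 2), p.2)
    else if x = 'B' then (p.1, p.2 + max 0 (run - 2))
    else p
termination_by l => l.length
decreasing_by
  simp only [List.length_cons]
  exact Nat.lt_succ_of_le (List.length_dropWhile_le _ _)

def winnerOfGame_alt (colors : String) : Bool :=
  let p := pvRuns colors.toList
  decide (p.1 > p.2)

-- ===== PRECONDITION & SPEC =====
def Spec_winnerOfGame (colors : String) (out : Bool) : Prop := out = winnerOfGame_alt colors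
instance (colors : String) (out : Bool) : Decidable (Spec_winnerOfGame colors out) := by unfold Spec_winnerOfGame; infer_instance

-- ===== CLAIM (what is proved, stated in full; the proofs are below) =====
def Claim_equal_winnerOfGame : Prop := ∀ (colors : String), Dom_winnerOfGame colors → Spec_winnerOfGame colors (winnerOfGame colors)

-- ===== LEMMAS AND PROOFS =====

-- Number of triplet windows (x,y,z) of consecutive equal characters equal to ch.
def countT (ch : Char) : List Char → Int
  | x :: y :: z :: rest => (if x = y ∧ y = z ∧ z = ch then 1 else 0) + countT ch (y :: z :: rest)
  | _ => 0

theorem foldN_eq_countT (c : List Char) (a0 b0 : Int) :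
    (List.range (c.length - 2)).foldl
      (fun (ab : Int × Int) (k : Nat) =>
        let ab :=
          if c.getD k ' ' = c.getD (k+1) ' ' ∧ c.getD (k+1) ' ' = c.getD (k+2) ' ' ∧ c.getD (k+2) ' ' = 'A'
          then (ab.1 + 1, ab.2) else ab
        if c.getD k ' ' = c.getD (k+1) ' ' ∧ c.getD (k+1) ' ' = c.getD (k+2) ' ' ∧ c.getD (k+2) ' ' = 'B'
        then (ab.1, ab.2 + 1) else ab)
      (a0, b0)
    = (a0 + countT 'A' c, b0 + countT 'B' c) := by
  induction c generalizing a0 b0 with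
  | nil => simp [countT]
  | cons x t ih =>
    match t with
    | [] => simp [countT]
    | [y] => simp [countT]
    | y :: z :: r =>
      have hlen : (x :: y :: z :: r).length - 2 = ((y :: z :: r).length - 2) + 1 := by
        simp
      rw [hlen, List.range_succ_eq_map, List.foldl_cons, List.foldl_map]
      have hfun : (fun (ab : Int × Int) (k : Nat) =>
          (fun (ab : Int × Int) (k : Nat) =>
            let ab :=
              if (x::y::z::r).getD k ' ' = (x::y::z::r).getD (k+1) ' ' ∧ (x::y::z::r).getD (k+1) ' ' = (x::y::z::r).getD (k+2) ' ' ∧ (x::y::z::r).getD (k+2) ' ' = 'A'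
              then (ab.1 + 1, ab.2) else ab
            if (x::y::z::r).getD k ' ' = (x::y::z::r).getD (k+1) ' ' ∧ (x::y::z::r).getD (k+1) ' ' = (x::y::z::r).getD (k+2) ' ' ∧ (x::y::z::r).getD (k+2) ' ' = 'B'
            then (ab.1, ab.2 + 1) else ab) ab (k+1))
          = (fun (ab : Int × Int) (k : Nat) =>
            let ab :=
              if (y::z::r).getD k ' ' = (y::z::r).getD (k+1) ' ' ∧ (y::z::r).getD (k+1) ' ' = (y::z::r).getD (k+2) ' ' ∧ (y::z::r).getD (k+2) ' ' = 'A'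
              then (ab.1 + 1, ab.2) else ab
            if (y::z::r).getD k ' ' = (y::z::r).getD (k+1) ' ' ∧ (y::z::r).getD (k+1) ' ' = (y::z::r).getD (k+2) ' ' ∧ (y::z::r).getD (k+2) ' ' = 'B'
            then (ab.1, ab.2 + 1) else ab) := by
        funext ab k
        have h2 : k+1+2 = (k+2)+1 := by omega
        simp only []
        rw [h2]
        simp only [List.getD_cons_succ]
      rw [hfun, ih]
      simp only [List.getD_cons_zero, List.getD_cons_succ, countT]
      split_ifs <;> simp [Prod.ext_iff] <;> omega

theorem countT_replicate_append (ch x : Char) (m : Nat) (d : List Char)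
    (hd : ∀ h, d.head? = some h → h ≠ x) :
    countT ch (List.replicate m x ++ d)
      = (if x = ch then max 0 ((m : Int) - 2) else 0) + countT ch d := by
  induction m with
  | zero => simp
  | succ n ih =>
    match n, ih with
    | 0, _ =>
      -- list is x :: d : no triple starting at x can be all-equal since d's head ≠ x
      match d with
      | [] => simp [countT]
      | [y] => simp [countT]
      | y :: z :: r =>
        have hy : y ≠ x := hd y rfl
        have : ¬ (x = y ∧ y = z ∧ z = ch) := by rintro ⟨h, -⟩; exact hy h.symm
        simp [countT, this]
    | 1, _ =>
      match d with
      | [] => simp [countT]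
      | y :: r =>
        have hy : y ≠ x := hd y rfl
        have h1 : ¬ (x = x ∧ x = y ∧ y = ch) := by rintro ⟨-, h, -⟩; exact hy h.symm
        match r with
        | [] =>
          simp [countT]
          intro h _; exact hy h.symm
        | z :: r' =>
          have h2 : ¬ (x = y ∧ y = z ∧ z = ch) := by rintro ⟨h, -⟩; exact hy h.symm
          simp [countT, h2]
          intro h _; exact hy h.symm
    | Nat.succ (Nat.succ k), ih =>
      -- replicate (k+3) x ++ d = x :: x :: x :: (replicate k x ++ d)
      have hrep : List.replicate (k+3) x ++ d = x :: (List.replicate (k+2) x ++ d) := by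
        simp [List.replicate_succ]
      have hhead : List.replicate (k+2) x ++ d = x :: x :: (List.replicate k x ++ d) := by
        simp [List.replicate_succ]
      rw [hrep, hhead]
      have : countT ch (x :: x :: x :: (List.replicate k x ++ d))
          = (if x = x ∧ x = x ∧ x = ch then 1 else 0) + countT ch (x :: x :: (List.replicate k x ++ d)) := rfl
      rw [this, ← hhead, ih]
      by_cases hc : x = ch
      · simp [hc]
        omega
      · simp [hc]

theorem pvRuns_aux : ∀ (n : Nat) (l : List Char), l.length ≤ n →
    pvRuns l = (countT 'A' l, countT 'B' l)
  | _, [], _ => by simp [pvRuns, countT]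
  | 0, x :: rest, h => by simp at h
  | Nat.succ n, x :: rest, h => by
    have hlen : (rest.dropWhile (fun y => y == x)).length ≤ n := by
      have := List.length_dropWhile_le (fun y => y == x) rest
      simp only [List.length_cons] at h
      omega
    have ih := pvRuns_aux n (rest.dropWhile (fun y => y == x)) hlen
    have ht : rest.takeWhile (fun y => y == x)
        = List.replicate (rest.takeWhile (fun y => y == x)).length x := by
      rw [List.eq_replicate_length]
      intro b hb
      simpa using List.mem_takeWhile_imp hb
    have hdec : x :: rest = List.replicate (1 + (rest.takeWhile (fun y => y == x)).length) x
        ++ rest.dropWhile (fun y => y == x) := by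
      calc x :: rest
          = x :: (rest.takeWhile (fun y => y == x) ++ rest.dropWhile (fun y => y == x)) := by
            rw [List.takeWhile_append_dropWhile]
        _ = _ := by
            rw [List.replicate_add]
            simp [← ht]
    have hhd : ∀ hc, (rest.dropWhile (fun y => y == x)).head? = some hc → hc ≠ x := by
      intro hc hh
      have := List.head?_dropWhile_not (p := fun y => y == x) (l := rest)
      rw [hh] at this
      simpa using this
    have hA := countT_replicate_append 'A' x (1 + (rest.takeWhile (fun y => y == x)).length) _ hhd
    have hB := countT_replicate_append 'B' x (1 + (rest.takeWhile (fun y => y == x)).length) _ hhd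
    rw [pvRuns]
    simp only [← hdec] at hA hB
    rw [ih, hA, hB]
    by_cases h1 : x = 'A'
    · simp only [h1]
      simp [Prod.ext_iff]
      omega
    · by_cases h2 : x = 'B'
      · simp only [h2, if_neg (by decide : ¬ ('B' : Char) = 'A')]
        simp [Prod.ext_iff]
        omega
      · simp [h1, h2]

theorem pvRuns_eq_countT (l : List Char) : pvRuns l = (countT 'A' l, countT 'B' l) :=
  pvRuns_aux l.length l (le_refl _)

-- ===== VERDICT (by name: the statement is the Claim_ definition above) =====
theorem winnerOfGame_spec : Claim_equal_winnerOfGame := by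
  intro colors _
  unfold Spec_winnerOfGame winnerOfGame winnerOfGame_alt
  simp only []
  set c := colors.toList with hc
  rw [PySem.List.pyRange_one]
  have hto : ((PySem.List.len c - 1) - 1).toNat = c.length - 2 := by
    simp [PySem.List.len]
    omega
  rw [hto, List.foldl_map]
  have hfun : (fun (ab : Int × Int) (k : Nat) =>
      (fun (ab : Int × Int) (i : Int) =>
        let ab :=
          if PySem.List.pyGetD c (i-1) ' ' = PySem.List.pyGetD c i ' ' ∧
             PySem.List.pyGetD c i ' ' = PySem.List.pyGetD c (i+1) ' ' ∧
             PySem.List.pyGetD c (i+1) ' ' = 'A'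
          then (ab.1 + 1, ab.2) else ab
        if PySem.List.pyGetD c (i-1) ' ' = PySem.List.pyGetD c i ' ' ∧
           PySem.List.pyGetD c i ' ' = PySem.List.pyGetD c (i+1) ' ' ∧
           PySem.List.pyGetD c (i+1) ' ' = 'B'
        then (ab.1, ab.2 + 1) else ab) ab (1 + (k : Int)))
      = (fun (ab : Int × Int) (k : Nat) =>
        let ab :=
          if c.getD k ' ' = c.getD (k+1) ' ' ∧ c.getD (k+1) ' ' = c.getD (k+2) ' ' ∧ c.getD (k+2) ' ' = 'A'
          then (ab.1 + 1, ab.2) else ab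
        if c.getD k ' ' = c.getD (k+1) ' ' ∧ c.getD (k+1) ' ' = c.getD (k+2) ' ' ∧ c.getD (k+2) ' ' = 'B'
        then (ab.1, ab.2 + 1) else ab) := by
    funext ab k
    simp only []
    rw [show (1 + (k : Int) - 1) = (k : Int) from by ring,
        show (1 + (k : Int)) = ((k+1 : Nat) : Int) from by push_cast; ring]
    rw [show ((k+1 : Nat) : Int) + 1 = ((k+2 : Nat) : Int) from by push_cast; ring]
    simp only [PySem.List.pyGetD_natCast]
  rw [hfun, foldN_eq_countT, pvRuns_eq_countT]
  simp
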